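-- pv_equiv track=rewrite | github.com/thinclab/IA2C | OpenOrg.py | calculate_net_action_effect
-- ===== SOURCE A (Python) =====
-- def calculate_net_action_effect(actions):
--     """
--     Calculates the net effect of all actions on the organization's state.
--     Returns 'increase', 'decrease', or 'stable'.
--     """
--     group_actions = sum(1 for action in actions.values() if action == 'group')
--     self_actions = sum(1 for action in actions.values() if action == 'self')
--
--     if group_actions > self_actions:
--         return 'increase'
--     elif group_actions < self_actions:
--         return 'decrease'
--     else:
--         return 'stable'
-- ===== SOURCE B (Python) =====
-- def calculate_net_action_effect(actions):
--     gs = [v for v in actions.values() if v == 'group']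
--     ss = [v for v in actions.values() if v == 'self']
--     while gs and ss:
--         gs.pop()
--         ss.pop()
--     if gs:
--         return 'increase'
--     if ss:
--         return 'decrease'
--     return 'stable'
-- ===== Notes on version B (the rewrite author's own statement) =====
-- stated objective: alternative
-- what changed: Replaces arithmetic counting and count comparison by token cancellation: the 'group' and 'self' occurrences are collected into two lists which are consumed pairwise until one is exhausted, and the verdict is read off from which residue list is non-empty (no counters, no numeric comparison).
import Mathlib
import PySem

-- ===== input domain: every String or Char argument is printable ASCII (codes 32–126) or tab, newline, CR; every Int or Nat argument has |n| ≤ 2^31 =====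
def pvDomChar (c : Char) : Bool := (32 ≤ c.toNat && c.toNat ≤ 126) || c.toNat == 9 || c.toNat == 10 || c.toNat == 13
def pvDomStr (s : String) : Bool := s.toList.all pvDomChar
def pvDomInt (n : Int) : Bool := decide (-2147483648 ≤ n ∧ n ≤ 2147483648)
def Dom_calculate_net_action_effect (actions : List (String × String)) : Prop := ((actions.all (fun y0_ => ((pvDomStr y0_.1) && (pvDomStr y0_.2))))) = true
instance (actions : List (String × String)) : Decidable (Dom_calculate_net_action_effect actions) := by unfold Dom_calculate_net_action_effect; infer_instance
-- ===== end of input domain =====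

-- B replaces counting-and-comparing by pairwise cancellation of the 'group'/'self' token lists (alternative decomposition, same cost).
-- ===== PORT A =====
def calculate_net_action_effect (actions : List (String × String)) : String :=
  let group_actions : Int :=
    (actions.map Prod.snd).foldl (fun acc action => if action = "group" then acc + 1 else acc) 0
  let self_actions : Int :=
    (actions.map Prod.snd).foldl (fun acc action => if action = "self" then acc + 1 else acc) 0
  if group_actions > self_actions then "increase"
  else if group_actions < self_actions then "decrease"
  else "stable"

-- ===== PORT B =====
-- the while-loop of Source B: pop one element from each list until one is empty (only emptiness of the residues is used)
def pvCancel : List String → List String → List String × List String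
  | _ :: gs, _ :: ss => pvCancel gs ss
  | gs, ss => (gs, ss)

def calculate_net_action_effect_alt (actions : List (String × String)) : String :=
  let gs := (actions.map Prod.snd).filter (fun v => v == "group")
  let ss := (actions.map Prod.snd).filter (fun v => v == "self")
  let r := pvCancel gs ss
  if !r.1.isEmpty then "increase"
  else if !r.2.isEmpty then "decrease"
  else "stable"

-- ===== PRECONDITION & SPEC =====
def Spec_calculate_net_action_effect (actions : List (String × String)) (out : String) : Prop := out = calculate_net_action_effect_alt actions
instance (actions : List (String × String)) (out : String) : Decidable (Spec_calculate_net_action_effect actions out) := by unfold Spec_calculate_net_action_effect; infer_instance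

-- ===== CLAIM (what is proved, stated in full; the proofs are below) =====
def Claim_equal_calculate_net_action_effect : Prop := ∀ (actions : List (String × String)), Dom_calculate_net_action_effect actions → Spec_calculate_net_action_effect actions (calculate_net_action_effect actions)

-- ===== LEMMAS AND PROOFS =====
lemma pv_count_foldl (l : List String) (t : String) (n : Int) :
    l.foldl (fun acc a => if a = t then acc + 1 else acc) n =
      n + ((l.filter (fun v => v == t)).length : Int) := by
  induction l generalizing n with
  | nil => simp
  | cons a tl ih =>
    simp only [List.foldl_cons, List.filter_cons]
    by_cases h : a = t
    · simp [h, ih]; omega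
    · simp [h, ih]

lemma pv_cancel_eq (gs ss : List String) :
    pvCancel gs ss = (gs.drop ss.length, ss.drop gs.length) := by
  induction gs generalizing ss with
  | nil => cases ss <;> simp [pvCancel]
  | cons a gs ih =>
    cases ss with
    | nil => simp [pvCancel]
    | cons b ss => simpa [pvCancel] using ih ss

lemma pv_isEmpty_drop (l : List String) (n : Nat) :
    (l.drop n).isEmpty = decide (l.length ≤ n) := by
  rw [Bool.eq_iff_iff]
  simp [List.isEmpty_iff, List.drop_eq_nil_iff]

-- ===== VERDICT (by name: the statement is the Claim_ definition above) =====
theorem calculate_net_action_effect_spec : Claim_equal_calculate_net_action_effect := by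
  intro actions _
  unfold Spec_calculate_net_action_effect calculate_net_action_effect calculate_net_action_effect_alt
  simp only [pv_count_foldl, pv_cancel_eq, pv_isEmpty_drop, zero_add,
    Bool.not_eq_true', decide_eq_false_iff_not, not_le]
  set G := ((actions.map Prod.snd).filter (fun v => v == "group")).length with hG
  set S := ((actions.map Prod.snd).filter (fun v => v == "self")).length with hS
  by_cases h1 : (G : Int) > (S : Int)
  · rw [if_pos h1, if_pos (by omega : S < G)]
  · rw [if_neg h1, if_neg (by omega : ¬ S < G)]
    by_cases h2 : (G : Int) < (S : Int)
    · rw [if_pos h2, if_pos (by omega : G < S)]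
    · rw [if_neg h2, if_neg (by omega : ¬ G < S)]
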